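-- pv_equiv track=rewrite | github.com/promptdriven/pdd | examples/edit_file_tool_example/tests/test_cache_manager.py | _create_test_content
-- ===== SOURCE A (Python) =====
-- def _create_test_content(lines: int, non_empty_lines: int, chars_per_line: int, non_ws_per_line: int) -> str:
--     """
--     Helper to generate content with specific complexity metrics.
--
--     This helper interleaves empty and non-empty lines to ensure that
--     `str.splitlines()` correctly reports the total line count, avoiding
--     issues with trailing empty lines being ignored.
--     """
--     line_content = "a" * non_ws_per_line + " " * (chars_per_line - non_ws_per_line)
--
--     non_empty_list = [line_content] * non_empty_lines
--     empty_list = [""] * (lines - non_empty_lines)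
--
--     # Weave the lists together to avoid issues with trailing empty lines
--     result_list = []
--     while non_empty_list or empty_list:
--         if non_empty_list:
--             result_list.append(non_empty_list.pop(0))
--         if empty_list:
--             result_list.append(empty_list.pop(0))
--
--     return "\n".join(result_list)
-- ===== SOURCE B (Python) =====
-- def _create_test_content(lines: int, non_empty_lines: int, chars_per_line: int, non_ws_per_line: int) -> str:
--     line_content = "a" * non_ws_per_line + " " * (chars_per_line - non_ws_per_line)
--     n = max(non_empty_lines, 0)
--     m = max(lines - non_empty_lines, 0)
--     k = min(n, m)
--     result_list = [line_content, ""] * k + [line_content] * (n - k) + [""] * (m - k)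
--     return "\n".join(result_list)
-- ===== Notes on version B (the rewrite author's own statement) =====
-- stated objective: simpler
-- what changed: Replaces the destructive pop(0) weaving loop with closed-form arithmetic list construction: min(n,m) interleaved pairs followed by the leftover run of whichever kind remains.
import Mathlib
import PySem

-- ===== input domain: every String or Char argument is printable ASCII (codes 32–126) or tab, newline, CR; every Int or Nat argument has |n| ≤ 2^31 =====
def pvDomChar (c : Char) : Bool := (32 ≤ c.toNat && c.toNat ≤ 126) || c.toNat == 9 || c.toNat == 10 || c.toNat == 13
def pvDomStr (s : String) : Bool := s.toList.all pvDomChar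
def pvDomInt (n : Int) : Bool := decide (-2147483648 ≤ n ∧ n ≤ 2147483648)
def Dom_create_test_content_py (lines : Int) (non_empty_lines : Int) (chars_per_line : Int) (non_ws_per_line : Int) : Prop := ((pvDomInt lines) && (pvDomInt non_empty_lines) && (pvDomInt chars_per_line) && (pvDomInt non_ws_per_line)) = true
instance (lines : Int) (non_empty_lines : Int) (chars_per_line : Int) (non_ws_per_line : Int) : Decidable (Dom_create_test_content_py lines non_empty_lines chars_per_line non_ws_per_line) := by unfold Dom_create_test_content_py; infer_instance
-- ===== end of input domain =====

-- B replaces A's destructive pop(0) weaving loop with a closed-form list built from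
-- min/max arithmetic on the two homogeneous run lengths (objective: simpler).


-- ===== PORT A =====
-- the while loop: pop(0) from each nonempty list in turn, appending to the result
def pvWeave : List String → List String → List String
  | [], [] => []
  | x :: xs, [] => x :: pvWeave xs []
  | [], y :: ys => y :: pvWeave [] ys
  | x :: xs, y :: ys => x :: y :: pvWeave xs ys

-- "a"*k for possibly negative k is List.replicate k.toNat (clamps at 0, exactly Python)
def create_test_content_py (lines : Int) (non_empty_lines : Int) (chars_per_line : Int) (non_ws_per_line : Int) : String :=
  let line_content : String :=
    String.ofList (List.replicate non_ws_per_line.toNat 'a' ++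
               List.replicate (chars_per_line - non_ws_per_line).toNat ' ')
  let non_empty_list := List.replicate non_empty_lines.toNat line_content
  let empty_list := List.replicate (lines - non_empty_lines).toNat ""
  PySem.Str.join "\n" (pvWeave non_empty_list empty_list)

-- ===== PORT B =====
def create_test_content_py_alt (lines : Int) (non_empty_lines : Int) (chars_per_line : Int) (non_ws_per_line : Int) : String :=
  let line_content : String :=
    String.ofList (List.replicate non_ws_per_line.toNat 'a' ++
               List.replicate (chars_per_line - non_ws_per_line).toNat ' ')
  let n : Nat := (max non_empty_lines 0).toNat
  let m : Nat := (max (lines - non_empty_lines) 0).toNat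
  let k : Nat := min n m
  let result_list := (List.replicate k [line_content, ""]).flatten ++
                     List.replicate (n - k) line_content ++
                     List.replicate (m - k) ""
  PySem.Str.join "\n" result_list

-- ===== PRECONDITION & SPEC =====
def Spec_create_test_content_py (lines : Int) (non_empty_lines : Int) (chars_per_line : Int) (non_ws_per_line : Int) (out : String) : Prop := out = create_test_content_py_alt lines non_empty_lines chars_per_line non_ws_per_line
instance (lines : Int) (non_empty_lines : Int) (chars_per_line : Int) (non_ws_per_line : Int) (out : String) : Decidable (Spec_create_test_content_py lines non_empty_lines chars_per_line non_ws_per_line out) := by unfold Spec_create_test_content_py; infer_instance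

-- ===== CLAIM (what is proved, stated in full; the proofs are below) =====
def Claim_equal_create_test_content_py : Prop := ∀ (lines : Int) (non_empty_lines : Int) (chars_per_line : Int) (non_ws_per_line : Int), Dom_create_test_content_py lines non_empty_lines chars_per_line non_ws_per_line → Spec_create_test_content_py lines non_empty_lines chars_per_line non_ws_per_line (create_test_content_py lines non_empty_lines chars_per_line non_ws_per_line)

-- ===== LEMMAS AND PROOFS =====

lemma pvWeave_nil_right (a : String) : ∀ n, pvWeave (List.replicate n a) [] = List.replicate n a := by
  intro n; induction n with
  | zero => simp [pvWeave]
  | succ n ih => simp [List.replicate_succ, pvWeave, ih]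

lemma pvWeave_nil_left (b : String) : ∀ m, pvWeave [] (List.replicate m b) = List.replicate m b := by
  intro m; induction m with
  | zero => simp [pvWeave]
  | succ m ih => simp [List.replicate_succ, pvWeave, ih]

lemma pvWeave_replicate (a b : String) :
    ∀ n m, pvWeave (List.replicate n a) (List.replicate m b) =
      (List.replicate (min n m) [a, b]).flatten ++
      List.replicate (n - min n m) a ++ List.replicate (m - min n m) b := by
  intro n
  induction n with
  | zero => intro m; simp [pvWeave_nil_left]
  | succ n ih =>
    intro m
    cases m with
    | zero => simp [pvWeave_nil_right]
    | succ m =>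
      have hmin : min (n + 1) (m + 1) = min n m + 1 := by omega
      simp [List.replicate_succ, pvWeave, ih m, hmin, List.append_assoc]

theorem create_test_content_py_spec_aux (lines non_empty_lines chars_per_line non_ws_per_line : Int) :
    create_test_content_py lines non_empty_lines chars_per_line non_ws_per_line =
    create_test_content_py_alt lines non_empty_lines chars_per_line non_ws_per_line := by
  have h1 : (max non_empty_lines 0).toNat = non_empty_lines.toNat := by omega
  have h2 : (max (lines - non_empty_lines) 0).toNat = (lines - non_empty_lines).toNat := by omega
  simp only [create_test_content_py, create_test_content_py_alt, h1, h2, pvWeave_replicate,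
    List.append_assoc]

-- ===== VERDICT (by name: the statement is the Claim_ definition above) =====
theorem create_test_content_py_spec : Claim_equal_create_test_content_py := by
  intro lines non_empty_lines chars_per_line non_ws_per_line _
  exact create_test_content_py_spec_aux lines non_empty_lines chars_per_line non_ws_per_line
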